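-- pv_equiv track=rewrite | github.com/YuanZheCSYZ/algorithm | search/binary_search/teemo_attacking.py | findPoisonedDuration
-- ===== SOURCE A (Python) =====
-- def findPoisonedDuration(timeSeries, duration):
--     p_set = set()
--     for x in timeSeries:
--         left = x
--         right = x + duration - 1
--         l_in = left in p_set
--         r_in = right in p_set
--         if l_in and r_in:
--             continue
--
--         if l_in != r_in:
--             while left <= right:
--                 mid = (left + right) // 2
--                 if mid in p_set:
--                     if l_in:
--                         if mid + 1 not in p_set:
--                             mid += 1
--                             break
--                         left = mid + 1
--                     else:
--                         if mid - 1 not in p_set: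
--                             mid -= 1
--                             break
--                         right = mid - 1
--                 else:
--                     if l_in:
--                         if mid - 1 in p_set:
--                             break
--                         else:
--                             right = mid - 1
--                     else:
--                         if mid + 1 in p_set:
--                             break
--                         else:
--                             left = mid + 1
--
--             if l_in:
--                 left = mid
--                 right = x + duration - 1
--             else:
--                 left = x
--                 right = mid
--
--         for p in range(left, right + 1):
--             p_set.add(p)
--
--     return len(p_set)
-- ===== SOURCE B (Python) =====
-- def findPoisonedDuration(timeSeries, duration):
--     if duration <= 0 or not timeSeries:
--         return 0
--     ts = sorted(timeSeries)
--     total = duration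
--     for prev, cur in zip(ts, ts[1:]):
--         total += min(duration, cur - prev)
--     return total
-- ===== Notes on version B (the rewrite author's own statement) =====
-- stated objective: faster
-- what changed: Replaces A's point-by-point poisoned set (one set insertion per poisoned second, plus a binary search) with sort-then-scan: sort the attack times once and sum min(duration, gap to next attack), so the cost no longer depends on duration.
-- outside the precondition, e.g. on findPoisonedDuration([1, -7, -5, -1], 5): A returns 12, B returns 13
import Mathlib
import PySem

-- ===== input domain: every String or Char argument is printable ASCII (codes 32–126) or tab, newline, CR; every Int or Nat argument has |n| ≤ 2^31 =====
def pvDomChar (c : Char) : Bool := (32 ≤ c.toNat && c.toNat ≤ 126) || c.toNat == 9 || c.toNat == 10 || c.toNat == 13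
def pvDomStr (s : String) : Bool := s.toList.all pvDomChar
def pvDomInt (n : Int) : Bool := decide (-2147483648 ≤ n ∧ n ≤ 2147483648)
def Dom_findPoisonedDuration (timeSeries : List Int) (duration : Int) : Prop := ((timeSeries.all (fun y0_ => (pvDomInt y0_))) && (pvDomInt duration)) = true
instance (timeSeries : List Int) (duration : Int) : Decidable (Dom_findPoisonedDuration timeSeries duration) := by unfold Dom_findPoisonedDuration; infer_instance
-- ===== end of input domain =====

-- B replaces A's point-by-point poisoned set with sort-then-scan (sum of capped gaps); return value only, no mutation involved.

-- ===== PORT A =====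
-- A's inner `while left <= right` binary-search loop; the `mid` parameter threads
-- Python's mutable `mid` variable (returned unchanged when the loop body never runs)
def pvBS (pset : PySem.Set Int) (lin : Bool) (left right mid : Int) : Int :=
  if h : left ≤ right then
    let m := PySem.Int.floordiv (left + right) 2
    if pset.contains m then
      if lin then
        if !(pset.contains (m + 1)) then m + 1
        else pvBS pset lin (m + 1) right m
      else
        if !(pset.contains (m - 1)) then m - 1
        else pvBS pset lin left (m - 1) m
    else
      if lin then
        if pset.contains (m - 1) then m
        else pvBS pset lin left (m - 1) m
      else
        if pset.contains (m + 1) then m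
        else pvBS pset lin (m + 1) right m
  else mid
termination_by (right - left + 1).toNat
decreasing_by
  all_goals
    have hb := PySem.Int.floordiv_two_mid_bounds h
    omega

-- one iteration of A's `for x in timeSeries` loop; state st = (p_set, mid)
def pvStep (duration : Int) (st : PySem.Set Int × Int) (x : Int) : PySem.Set Int × Int :=
  if st.1.contains x && st.1.contains (x + duration - 1) then st
  else if st.1.contains x != st.1.contains (x + duration - 1) then
    (PySem.Set.update st.1 (PySem.List.pyRange
        (if st.1.contains x then pvBS st.1 (st.1.contains x) x (x + duration - 1) st.2 else x)
        ((if st.1.contains x then x + duration - 1 else pvBS st.1 (st.1.contains x) x (x + duration - 1) st.2) + 1) 1),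
      pvBS st.1 (st.1.contains x) x (x + duration - 1) st.2)
  else
    (PySem.Set.update st.1 (PySem.List.pyRange x (x + duration - 1 + 1) 1), st.2)

def findPoisonedDuration (timeSeries : List Int) (duration : Int) : Int :=
  PySem.Set.len (timeSeries.foldl (pvStep duration) (PySem.Set.empty, 0)).1

-- ===== PORT B =====
def findPoisonedDuration_alt (timeSeries : List Int) (duration : Int) : Int :=
  if duration ≤ 0 || timeSeries.isEmpty then 0
  else
    let ts := PySem.List.sorted timeSeries (fun x => x) false
    (ts.zip ts.tail).foldl (fun tot p => tot + min duration (p.2 - p.1)) duration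

-- ===== PRECONDITION & SPEC =====
-- Pre_ keeps the function's specified input format (LeetCode 495: timeSeries is
-- non-decreasing) and two further quirk-free families (duration ≤ 0, and series whose
-- attacks are pairwise ≥ duration apart in any order); on remaining out-of-contract
-- unsorted series A's skip/binary-search logic over its point set can undercount the
-- union (see cites).
def Pre_findPoisonedDuration (timeSeries : List Int) (duration : Int) : Prop :=
  List.Pairwise (· ≤ ·) timeSeries ∨ duration ≤ 0 ∨
    List.Pairwise (fun a b => duration ≤ |a - b|) timeSeries
instance (timeSeries : List Int) (duration : Int) : Decidable (Pre_findPoisonedDuration timeSeries duration) := by unfold Pre_findPoisonedDuration; infer_instance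

def pvWitness_findPoisonedDuration : List Int × Int := ([1, 2, 7], 3)

def Spec_findPoisonedDuration (timeSeries : List Int) (duration : Int) (out : Int) : Prop := out = findPoisonedDuration_alt timeSeries duration
instance (timeSeries : List Int) (duration : Int) (out : Int) : Decidable (Spec_findPoisonedDuration timeSeries duration out) := by unfold Spec_findPoisonedDuration; infer_instance

-- ===== CLAIM (what is proved, stated in full; the proofs are below) =====
def Claim_equal_findPoisonedDuration : Prop := ∀ (timeSeries : List Int) (duration : Int), Dom_findPoisonedDuration timeSeries duration → Pre_findPoisonedDuration timeSeries duration → Spec_findPoisonedDuration timeSeries duration (findPoisonedDuration timeSeries duration)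

-- ===== LEMMAS AND PROOFS =====

-- evaluating one step of A under each combination of the two membership tests
theorem pvStep_tt (d : Int) (pset : PySem.Set Int) (m0 x : Int)
    (h1 : pset.contains x = true) (h2 : pset.contains (x + d - 1) = true) :
    pvStep d (pset, m0) x = (pset, m0) := by
  unfold pvStep
  rw [h1, h2]
  simp

theorem pvStep_tf (d : Int) (pset : PySem.Set Int) (m0 x : Int)
    (h1 : pset.contains x = true) (h2 : pset.contains (x + d - 1) = false) :
    pvStep d (pset, m0) x =
      (PySem.Set.update pset (PySem.List.pyRange (pvBS pset true x (x + d - 1) m0) (x + d - 1 + 1) 1),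
       pvBS pset true x (x + d - 1) m0) := by
  unfold pvStep
  rw [h1, h2]
  simp

theorem pvStep_ff (d : Int) (pset : PySem.Set Int) (m0 x : Int)
    (h1 : pset.contains x = false) (h2 : pset.contains (x + d - 1) = false) :
    pvStep d (pset, m0) x = (PySem.Set.update pset (PySem.List.pyRange x (x + d - 1 + 1) 1), m0) := by
  unfold pvStep
  rw [h1, h2]
  simp

-- duration ≤ 0: A's state never changes
theorem pvStep_nonpos (d : Int) (hd : d ≤ 0) (m x : Int) :
    pvStep d (([] : PySem.Set Int), m) x = (([] : PySem.Set Int), m) := by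
  rw [pvStep_ff d [] m x rfl rfl, PySem.List.pyRange_one_eq_nil (by omega)]
  rfl

theorem foldA_nonpos (d : Int) (hd : d ≤ 0) (l : List Int) (m : Int) :
    l.foldl (pvStep d) (([] : PySem.Set Int), m) = (([] : PySem.Set Int), m) := by
  induction l with
  | nil => rfl
  | cons x t ih => rw [List.foldl_cons, pvStep_nonpos d hd m x, ih]

-- binary search: if pset ∩ [l, ∞) = [l, M] with l ≤ M < r, the loop exits with value M + 1
theorem pvBS_eq (n : Nat) : ∀ (pset : PySem.Set Int) (l r mid M : Int),
    (r - l).toNat ≤ n → l ≤ M → M < r →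
    (∀ y, l ≤ y → (pset.contains y = true ↔ y ≤ M)) →
    pvBS pset true l r mid = M + 1 := by
  induction n with
  | zero =>
    intro pset l r mid M hn h1 h2 _; omega
  | succ n ih =>
    intro pset l r mid M hn h1 h2 hch
    have hlr : l ≤ r := by omega
    rw [pvBS]
    simp only [dif_pos hlr]
    have hb := PySem.Int.floordiv_two_mid_bounds hlr
    set m := PySem.Int.floordiv (l + r) 2 with hm
    by_cases hmM : m ≤ M
    · have hc : pset.contains m = true := (hch m (by omega)).2 hmM
      by_cases hm1 : m + 1 ≤ M
      · have hc1 : pset.contains (m + 1) = true := (hch (m + 1) (by omega)).2 hm1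
        simp only [hc, hc1, if_true, Bool.not_true, Bool.false_eq_true, if_false]
        exact ih pset (m + 1) r m M (by omega) (by omega) h2 (fun y hy => hch y (by omega))
      · have hc1 : pset.contains (m + 1) = false := by
          cases hcc : pset.contains (m + 1)
          · rfl
          · exact absurd ((hch (m + 1) (by omega)).1 hcc) hm1
        simp only [hc, hc1, if_true, Bool.not_false]
        omega
    · have hc : pset.contains m = false := by
        cases hcc : pset.contains m
        · rfl
        · exact absurd ((hch m (by omega)).1 hcc) hmM
      by_cases hm1 : m - 1 ≤ M
      · have hc1 : pset.contains (m - 1) = true := (hch (m - 1) (by omega)).2 hm1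
        simp only [hc, hc1, Bool.false_eq_true, if_false, if_true]
        omega
      · have hc1 : pset.contains (m - 1) = false := by
          cases hcc : pset.contains (m - 1)
          · rfl
          · exact absurd ((hch (m - 1) (by omega)).1 hcc) hm1
        simp only [hc, hc1, Bool.false_eq_true, if_false, if_true]
        exact ih pset l (m - 1) m M (by omega) h1 (by omega) hch

-- the invariant carried along A's outer loop (d ≥ 1, prefix nonempty, last = max element)
def pvInv (d : Int) (pset : PySem.Set Int) (last : Int) : Prop :=
  pset.Nodup ∧ (∀ y ∈ pset, y ≤ last + d - 1) ∧ (∀ y, last ≤ y → y ≤ last + d - 1 → y ∈ pset)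

theorem contains_true_of_mem (pset : PySem.Set Int) (y : Int) (h : y ∈ pset) :
    pset.contains y = true := (PySem.Set.contains_iff pset y).2 h

theorem mem_of_contains_true (pset : PySem.Set Int) (y : Int) (h : pset.contains y = true) :
    y ∈ pset := (PySem.Set.contains_iff pset y).1 h

theorem contains_false_of_not_mem (pset : PySem.Set Int) (y : Int) (h : y ∉ pset) :
    pset.contains y = false := by
  cases hcc : pset.contains y
  · rfl
  · exact absurd (mem_of_contains_true pset y hcc) h

-- one step of A on a sorted series: the set grows by exactly min d (x - last) points
theorem pvStep_main (d : Int) (hd : 1 ≤ d) (pset : PySem.Set Int) (last x m0 : Int)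
    (hlx : last ≤ x) (hinv : pvInv d pset last) :
    pvInv d (pvStep d (pset, m0) x).1 x ∧
    ((pvStep d (pset, m0) x).1.length : Int) = (pset.length : Int) + min d (x - last) := by
  obtain ⟨hnd, hub, hlb⟩ := hinv
  by_cases hx : x ≤ last + d - 1
  · -- x falls inside the last block: lin = true
    have hlin : pset.contains x = true := contains_true_of_mem _ _ (hlb x hlx hx)
    by_cases hr : x + d - 1 ≤ last + d - 1
    · -- duplicate of last: rin = true, A skips the attack
      have hxe : x = last := by omega
      have hrin : pset.contains (x + d - 1) = true :=
        contains_true_of_mem _ _ (hlb _ (by omega) (by omega))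
      rw [pvStep_tt d pset m0 x hlin hrin]
      refine ⟨⟨hnd, ?_, ?_⟩, ?_⟩
      · intro y hy; have := hub y hy; omega
      · intro y h1 h2; exact hlb y (by omega) (by omega)
      · show ((pset.length : Int)) = (pset.length : Int) + min d (x - last)
        omega
    · -- x extends the last block: rin = false, the binary search returns last + d
      have hrin : pset.contains (x + d - 1) = false := by
        apply contains_false_of_not_mem
        intro hmem
        have := hub _ hmem; omega
      have hbs : pvBS pset true x (x + d - 1) m0 = last + d := by
        have := pvBS_eq (x + d - 1 - x).toNat pset x (x + d - 1) m0 (last + d - 1)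
          (le_refl _) (by omega) (by omega) ?_
        · omega
        · intro y hy
          constructor
          · intro hym; exact hub y (mem_of_contains_true _ _ hym)
          · intro hyM; exact contains_true_of_mem _ _ (hlb y (by omega) hyM)
      have hdisj : ∀ y ∈ PySem.List.pyRange (last + d) (x + d - 1 + 1) 1, y ∉ pset := by
        intro y hy hmem
        rw [PySem.List.mem_pyRange_one] at hy
        have := hub y hmem; omega
      have hupd : PySem.Set.update pset (PySem.List.pyRange (last + d) (x + d - 1 + 1) 1)
          = pset ++ PySem.List.pyRange (last + d) (x + d - 1 + 1) 1 := by
        apply PySem.Set.update_eq_append_of_disjoint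
        · exact PySem.List.nodup_pyRange_one _ _
        · exact hdisj
      rw [pvStep_tf d pset m0 x hlin hrin, hbs]
      simp only [hupd]
      refine ⟨⟨?_, ?_, ?_⟩, ?_⟩
      · rw [List.nodup_append]
        exact ⟨hnd, PySem.List.nodup_pyRange_one _ _, by intro a ha b hb hab; exact hdisj b hb (hab ▸ ha)⟩
      · intro y hy
        rcases List.mem_append.1 hy with h | h
        · have := hub y h; omega
        · rw [PySem.List.mem_pyRange_one] at h; omega
      · intro y h1 h2
        rcases le_or_gt y (last + d - 1) with h | h
        · exact List.mem_append.2 (Or.inl (hlb y (by omega) h))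
        · exact List.mem_append.2 (Or.inr (PySem.List.mem_pyRange_one.2 ⟨by omega, by omega⟩))
      · rw [List.length_append, PySem.List.length_pyRange_one]
        have h1 : ((x + d - 1 + 1 - (last + d)).toNat : Int) = x - last := by omega
        push_cast [h1]
        omega
  · -- disjoint new block: lin = rin = false, A inserts the whole interval
    have hlin : pset.contains x = false := by
      apply contains_false_of_not_mem
      intro hmem
      have := hub _ hmem; omega
    have hrin : pset.contains (x + d - 1) = false := by
      apply contains_false_of_not_mem
      intro hmem
      have := hub _ hmem; omega
    have hdisj : ∀ y ∈ PySem.List.pyRange x (x + d - 1 + 1) 1, y ∉ pset := by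
      intro y hy hmem
      rw [PySem.List.mem_pyRange_one] at hy
      have := hub y hmem; omega
    have hupd : PySem.Set.update pset (PySem.List.pyRange x (x + d - 1 + 1) 1)
        = pset ++ PySem.List.pyRange x (x + d - 1 + 1) 1 := by
      apply PySem.Set.update_eq_append_of_disjoint
      · exact PySem.List.nodup_pyRange_one _ _
      · exact hdisj
    rw [pvStep_ff d pset m0 x hlin hrin]
    simp only [hupd]
    refine ⟨⟨?_, ?_, ?_⟩, ?_⟩
    · rw [List.nodup_append]
      exact ⟨hnd, PySem.List.nodup_pyRange_one _ _, by intro a ha b hb hab; exact hdisj b hb (hab ▸ ha)⟩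
    · intro y hy
      rcases List.mem_append.1 hy with h | h
      · have := hub y h; omega
      · rw [PySem.List.mem_pyRange_one] at h; omega
    · intro y h1 h2
      exact List.mem_append.2 (Or.inr (PySem.List.mem_pyRange_one.2 ⟨by omega, by omega⟩))
    · rw [List.length_append, PySem.List.length_pyRange_one]
      have h1 : ((x + d - 1 + 1 - x).toNat : Int) = d := by omega
      push_cast [h1]
      omega

-- B's capped gap sum over the tail of the sorted series
def pvGapSum (d : Int) (last : Int) : List Int → Int
  | [] => 0
  | x :: t => min d (x - last) + pvGapSum d x t

-- A's fold over the tail adds exactly the gap sum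
theorem foldA_main (d : Int) (hd : 1 ≤ d) : ∀ (t : List Int) (pset : PySem.Set Int) (last m0 : Int),
    List.Pairwise (· ≤ ·) (last :: t) → pvInv d pset last →
    ((t.foldl (pvStep d) (pset, m0)).1.length : Int) = (pset.length : Int) + pvGapSum d last t := by
  intro t
  induction t with
  | nil => intro pset last m0 _ _; simp [pvGapSum]
  | cons x r ih =>
    intro pset last m0 hsort hinv
    have hlx : last ≤ x := (List.pairwise_cons.1 hsort).1 x (List.mem_cons_self ..)
    obtain ⟨hinv', hlen⟩ := pvStep_main d hd pset last x m0 hlx hinv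
    have hsort' : List.Pairwise (· ≤ ·) (x :: r) := (List.pairwise_cons.1 hsort).2
    have hrec := ih (pvStep d (pset, m0) x).1 x (pvStep d (pset, m0) x).2 hsort' hinv'
    rw [show ((pvStep d (pset, m0) x).1, (pvStep d (pset, m0) x).2) = pvStep d (pset, m0) x
          from rfl] at hrec
    rw [List.foldl_cons, pvGapSum]
    omega

-- B's fold equals its initial value plus the gap sum
theorem foldB_eq (d : Int) : ∀ (t : List Int) (last tot : Int),
    ((last :: t).zip t).foldl (fun tot p => tot + min d (p.2 - p.1)) tot = tot + pvGapSum d last t := by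
  intro t
  induction t with
  | nil => intro last tot; simp [pvGapSum]
  | cons x r ih =>
    intro last tot
    simp only [List.zip_cons_cons, List.foldl_cons]
    rw [ih x (tot + min d (x - last)), pvGapSum]
    omega

-- separated series (pairwise ≥ d apart, any order): every step takes the plain-insert branch
theorem foldA_sep (d : Int) (hd : 1 ≤ d) : ∀ (t : List Int) (pset : PySem.Set Int) (m0 : Int),
    pset.Nodup →
    (∀ y ∈ pset, ∃ x0, (∀ x ∈ t, d ≤ |x0 - x|) ∧ x0 ≤ y ∧ y ≤ x0 + d - 1) →
    List.Pairwise (fun a b => d ≤ |a - b|) t →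
    ((t.foldl (pvStep d) (pset, m0)).1.length : Int) = (pset.length : Int) + d * t.length := by
  intro t
  induction t with
  | nil => intro pset m0 _ _ _; simp
  | cons x r ih =>
    intro pset m0 hnd hcov hsep
    have hxm : x ∉ pset := by
      intro hmem
      obtain ⟨x0, hs, h1, h2⟩ := hcov x hmem
      have := hs x (List.mem_cons_self ..)
      rcases abs_cases (x0 - x) with ⟨he, _⟩ | ⟨he, _⟩ <;> omega
    have hrm : x + d - 1 ∉ pset := by
      intro hmem
      obtain ⟨x0, hs, h1, h2⟩ := hcov _ hmem
      have := hs x (List.mem_cons_self ..)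
      rcases abs_cases (x0 - x) with ⟨he, _⟩ | ⟨he, _⟩ <;> omega
    have hdisj : ∀ y ∈ PySem.List.pyRange x (x + d - 1 + 1) 1, y ∉ pset := by
      intro y hy hmem
      rw [PySem.List.mem_pyRange_one] at hy
      obtain ⟨x0, hs, h1, h2⟩ := hcov y hmem
      have := hs x (List.mem_cons_self ..)
      rcases abs_cases (x0 - x) with ⟨he, _⟩ | ⟨he, _⟩ <;> omega
    have hupd : PySem.Set.update pset (PySem.List.pyRange x (x + d - 1 + 1) 1)
        = pset ++ PySem.List.pyRange x (x + d - 1 + 1) 1 := by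
      apply PySem.Set.update_eq_append_of_disjoint
      · exact PySem.List.nodup_pyRange_one _ _
      · exact hdisj
    have hnd' : (pset ++ PySem.List.pyRange x (x + d - 1 + 1) 1).Nodup := by
      rw [List.nodup_append]
      exact ⟨hnd, PySem.List.nodup_pyRange_one _ _,
             by intro a ha b hb hab; exact hdisj b hb (hab ▸ ha)⟩
    have hcov' : ∀ y ∈ pset ++ PySem.List.pyRange x (x + d - 1 + 1) 1,
        ∃ x0, (∀ z ∈ r, d ≤ |x0 - z|) ∧ x0 ≤ y ∧ y ≤ x0 + d - 1 := by
      intro y hy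
      rcases List.mem_append.1 hy with h | h
      · obtain ⟨x0, hs, h1, h2⟩ := hcov y h
        exact ⟨x0, fun z hz => hs z (List.mem_cons_of_mem _ hz), h1, h2⟩
      · rw [PySem.List.mem_pyRange_one] at h
        exact ⟨x, fun z hz => (List.pairwise_cons.1 hsep).1 z hz, by omega, by omega⟩
    have hrec := ih (pset ++ PySem.List.pyRange x (x + d - 1 + 1) 1) m0 hnd' hcov'
      (List.pairwise_cons.1 hsep).2
    rw [List.foldl_cons,
        pvStep_ff d pset m0 x (contains_false_of_not_mem _ _ hxm)
          (contains_false_of_not_mem _ _ hrm), hupd, hrec,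
        List.length_append, PySem.List.length_pyRange_one]
    have h1 : ((x + d - 1 + 1 - x).toNat : Int) = d := by omega
    simp only [List.length_cons]
    push_cast [h1]
    ring

-- the gap sum of a sorted, pairwise-separated series: every gap is capped at d
theorem gapSum_sep (d : Int) : ∀ (t : List Int) (last : Int),
    List.Pairwise (· ≤ ·) (last :: t) → List.Pairwise (fun a b => d ≤ |a - b|) (last :: t) →
    pvGapSum d last t = d * t.length := by
  intro t
  induction t with
  | nil => intro last _ _; simp [pvGapSum]
  | cons x r ih =>
    intro last hle hsep
    have h1 : last ≤ x := (List.pairwise_cons.1 hle).1 x (List.mem_cons_self ..)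
    have h2 : d ≤ |last - x| := (List.pairwise_cons.1 hsep).1 x (List.mem_cons_self ..)
    have hmin : min d (x - last) = d := by
      rcases abs_cases (last - x) with ⟨he, _⟩ | ⟨he, _⟩ <;> omega
    rw [pvGapSum, hmin, ih x (List.pairwise_cons.1 hle).2 (List.pairwise_cons.1 hsep).2]
    simp only [List.length_cons]
    push_cast
    ring

-- ===== VERDICT (by name: the statement is the Claim_ definition above) =====
theorem findPoisonedDuration_spec : Claim_equal_findPoisonedDuration := by
  intro ts d _ hpre
  unfold Spec_findPoisonedDuration
  by_cases hd : d ≤ 0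
  · unfold findPoisonedDuration findPoisonedDuration_alt
    rw [show (PySem.Set.empty : PySem.Set Int) = ([] : PySem.Set Int) from rfl,
        foldA_nonpos d hd ts 0]
    simp [hd, PySem.Set.len]
  · have hd1 : 1 ≤ d := by omega
    rcases hpre with hsort | h | hsep
    · -- sorted series
      unfold findPoisonedDuration findPoisonedDuration_alt
      cases ts with
      | nil => simp [PySem.Set.len, PySem.Set.empty]
      | cons h t =>
        have hself : PySem.List.sorted (h :: t) (fun x => x) false = h :: t :=
          PySem.List.sorted_eq_self_of_pairwise (h :: t) (fun x => x) hsort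
        simp only [hself, List.isEmpty_cons, Bool.or_false, List.tail_cons]
        rw [if_neg (by simp [hd]), foldB_eq d t h d]
        -- A's first step, from the empty set
        have hstep0 : pvStep d ((PySem.Set.empty : PySem.Set Int), 0) h =
            (PySem.List.pyRange h (h + d - 1 + 1) 1, 0) := by
          rw [show (PySem.Set.empty : PySem.Set Int) = ([] : PySem.Set Int) from rfl,
              pvStep_ff d [] 0 h rfl rfl]
          rw [show PySem.Set.update ([] : PySem.Set Int) (PySem.List.pyRange h (h + d - 1 + 1) 1)
                = PySem.Set.ofList (PySem.List.pyRange h (h + d - 1 + 1) 1) from rfl,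
              PySem.Set.ofList_eq_self_of_nodup _ (PySem.List.nodup_pyRange_one _ _)]
        have hinv0 : pvInv d (PySem.List.pyRange h (h + d - 1 + 1) 1) h := by
          refine ⟨PySem.List.nodup_pyRange_one _ _, ?_, ?_⟩
          · intro y hy; rw [PySem.List.mem_pyRange_one] at hy; omega
          · intro y h1 h2; exact PySem.List.mem_pyRange_one.2 ⟨h1, by omega⟩
        have hA := foldA_main d hd1 t (PySem.List.pyRange h (h + d - 1 + 1) 1) h 0 hsort hinv0
        rw [List.foldl_cons, hstep0, PySem.Set.len, hA, PySem.List.length_pyRange_one]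
        have h1 : ((h + d - 1 + 1 - h).toNat : Int) = d := by omega
        omega
    · omega
    · -- pairwise-separated series: both sides count d points per attack
      unfold findPoisonedDuration findPoisonedDuration_alt
      cases ts with
      | nil => simp [PySem.Set.len, PySem.Set.empty]
      | cons h t =>
        have hA := foldA_sep d hd1 (h :: t) [] 0 List.nodup_nil (by simp) hsep
        have hperm : (PySem.List.sorted (h :: t) (fun x => x) false).Perm (h :: t) :=
          PySem.List.sorted_perm (h :: t) (fun x => x) false
        have hle : List.Pairwise (· ≤ ·) (PySem.List.sorted (h :: t) (fun x => x) false) :=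
          PySem.List.sorted_pairwise (h :: t) (fun x => x)
        have hseps : List.Pairwise (fun a b => d ≤ |a - b|)
            (PySem.List.sorted (h :: t) (fun x => x) false) :=
          (hperm.pairwise_iff (by intro a b hab; rw [abs_sub_comm]; exact hab)).2 hsep
        have hlen : (PySem.List.sorted (h :: t) (fun x => x) false).length = t.length + 1 := by
          rw [hperm.length_eq]; rfl
        cases hs : PySem.List.sorted (h :: t) (fun x => x) false with
        | nil => rw [hs] at hlen; simp at hlen
        | cons sh st =>
          rw [hs] at hle hseps hlen
          simp only [List.isEmpty_cons, Bool.or_false, List.tail_cons]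
          rw [show (PySem.Set.empty : PySem.Set Int) = ([] : PySem.Set Int) from rfl,
              if_neg (by simp [hd]), foldB_eq d st sh d,
              gapSum_sep d st sh hle hseps, PySem.Set.len, hA]
          simp only [List.length_cons] at hlen
          simp only [List.length_cons, List.length_nil]
          push_cast [show st.length = t.length from by omega]
          ring
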